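-- pv_equiv track=rewrite | github.com/viperleed/viperleed | tleedmlib/base.py | splitSublists
-- ===== SOURCE A (Python) =====
-- def splitSublists(llist, sep):                                                  # TODO: could be an iterator
--     """Takes a list and a separator, splits strings in the list by the
--     separator, returns results as list of lists"""
--     newlist = []
--     sublist = []
--     for el in llist:
--         if sep not in el:
--             sublist.append(el)
--         else:
--             pl = el.split(sep)
--             if pl[0]:
--                 sublist.append(pl[0])
--             newlist.append(sublist)
--             sublist = []
--             if len(pl) > 1:
--                 for i in range(1, len(pl)):
--                     s = pl[i]
--                     if s:
--                         sublist.append(s)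
--                     if i != len(pl) - 1:
--                         newlist.append(sublist)
--                         sublist = []
--     newlist.append(sublist)
--     return(newlist)
-- ===== SOURCE B (Python) =====
-- def splitSublists(llist, sep):
--     """Marker-stream re-implementation: first flatten llist into a token
--     stream where a unique SEP sentinel marks each split point, then fold
--     the stream into sublists."""
--     SEP = object()
--     tokens = []
--     for el in llist:
--         if sep not in el:
--             tokens.append(el)
--         else:
--             pieces = el.split(sep)
--             head, rest = pieces[0], pieces[1:]
--             if head:
--                 tokens.append(head)
--             for p in rest:
--                 tokens.append(SEP)
--                 if p:
--                     tokens.append(p)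
--     newlist = []
--     sublist = []
--     for t in tokens:
--         if t is SEP:
--             newlist.append(sublist)
--             sublist = []
--         else:
--             sublist.append(t)
--     newlist.append(sublist)
--     return newlist
-- ===== Notes on version B (the rewrite author's own statement) =====
-- stated objective: alternative
-- what changed: A interleaves splitting and sublist building in one stateful nested loop; B first flattens the list into a token stream with a unique SEP sentinel object marking split points, then folds that stream into sublists in a second pass.
import Mathlib
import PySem

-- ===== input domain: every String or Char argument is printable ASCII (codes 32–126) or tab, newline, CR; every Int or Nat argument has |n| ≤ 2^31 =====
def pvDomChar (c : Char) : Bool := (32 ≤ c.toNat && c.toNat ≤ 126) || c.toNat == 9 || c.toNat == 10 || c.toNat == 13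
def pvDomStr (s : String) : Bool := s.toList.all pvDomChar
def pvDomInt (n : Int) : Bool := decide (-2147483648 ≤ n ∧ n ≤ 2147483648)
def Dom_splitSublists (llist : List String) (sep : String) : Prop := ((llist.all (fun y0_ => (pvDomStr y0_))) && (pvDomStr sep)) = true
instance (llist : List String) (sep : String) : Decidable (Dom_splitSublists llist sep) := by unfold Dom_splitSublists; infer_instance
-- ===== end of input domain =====

-- B replaces A's interleaved state machine by a two-pass marker-stream decomposition (flatten to tokens with a SEP sentinel, then fold into sublists); objective: alternative.


-- ===== PORT A =====
-- inner 'for i in range(1, len(pl))' loop, iterated over the tail of pl: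
-- 'i != len(pl) - 1' is 'the element is not the last one'
def splitSublistsInner (st : List (List String) × List String) :
    List String → List (List String) × List String
  | [] => st
  | [s] => if s = "" then st else (st.1, st.2 ++ [s])
  | s :: r :: rest =>
      let st1 := if s = "" then st else (st.1, st.2 ++ [s])
      splitSublistsInner (st1.1 ++ [st1.2], []) (r :: rest)

def splitSublistsStep (sep : String) (st : List (List String) × List String)
    (el : String) : List (List String) × List String :=
  if PySem.Str.isIn sep el = false then (st.1, st.2 ++ [el])
  else
    let pl := (PySem.Str.split? el sep).getD []   -- el.split(sep); none (sep = "") excluded by Pre_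
    let p0 := pl.headD ""                         -- pl[0]; split always returns ≥ 1 piece
    let st1 := if p0 = "" then st else (st.1, st.2 ++ [p0])
    splitSublistsInner (st1.1 ++ [st1.2], []) pl.tail

def splitSublists (llist : List String) (sep : String) : List (List String) :=
  let st := llist.foldl (splitSublistsStep sep) ([], [])
  st.1 ++ [st.2]

-- ===== PORT B =====
-- token stream: 'none' is the SEP sentinel, 'some s' an ordinary token
def splitSublistsTok (sep : String) (el : String) : List (Option String) :=
  if PySem.Str.isIn sep el = false then [some el]
  else
    let pl := (PySem.Str.split? el sep).getD []   -- el.split(sep); none (sep = "") excluded by Pre_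
    let head := pl.headD ""
    (if head = "" then [] else [some head]) ++
      pl.tail.flatMap (fun p => none :: (if p = "" then [] else [some p]))

def splitSublistsFold (st : List (List String) × List String)
    (ts : List (Option String)) : List (List String) × List String :=
  ts.foldl (fun st t =>
    match t with
    | none => (st.1 ++ [st.2], ([] : List String))
    | some x => (st.1, st.2 ++ [x])) st

def splitSublists_alt (llist : List String) (sep : String) : List (List String) :=
  let tokens := llist.foldl (fun acc el => acc ++ splitSublistsTok sep el) []
  let st := splitSublistsFold ([], []) tokens
  st.1 ++ [st.2]

-- ===== PRECONDITION & SPEC =====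
-- Pre_ excludes sep = "" with a nonempty llist: there Python's el.split('') raises ValueError (in A and in B alike).
def Pre_splitSublists (llist : List String) (sep : String) : Prop :=
  sep ≠ "" ∨ llist = []
instance (llist : List String) (sep : String) : Decidable (Pre_splitSublists llist sep) := by
  unfold Pre_splitSublists; infer_instance
def pvWitness_splitSublists : List String × String := (["a,b", "c", ",d"], ",")

def Spec_splitSublists (llist : List String) (sep : String) (out : List (List String)) : Prop := out = splitSublists_alt llist sep
instance (llist : List String) (sep : String) (out : List (List String)) : Decidable (Spec_splitSublists llist sep out) := by unfold Spec_splitSublists; infer_instance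

-- ===== CLAIM (what is proved, stated in full; the proofs are below) =====
def Claim_equal_splitSublists : Prop := ∀ (llist : List String) (sep : String), Dom_splitSublists llist sep → Pre_splitSublists llist sep → Spec_splitSublists llist sep (splitSublists llist sep)

-- ===== LEMMAS AND PROOFS =====

-- any splitOn.go result has at least acc.length + 1 pieces
theorem pvGoLenGe (sep : List Char) : ∀ (fuel : Nat) (l cur : List Char) (acc : List (List Char)),
    acc.length + 1 ≤ (PySem.Chars.splitOn.go sep fuel l cur acc).length := by
  intro fuel
  induction fuel with
  | zero => intro l cur acc; simp [PySem.Chars.splitOn.go]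
  | succ f ih =>
    intro l cur acc
    cases l with
    | nil => simp [PySem.Chars.splitOn.go]
    | cons c rest =>
      rw [PySem.Chars.splitOn.go]
      split
      · exact le_trans (by simp) (ih _ _ _)
      · exact ih _ _ _

-- if sep occurs in the remaining input, splitOn.go produces at least acc.length + 2 pieces
theorem pvGoLenGe2 (sep : List Char) (hsep : sep ≠ []) :
    ∀ (fuel : Nat) (l cur : List Char) (acc : List (List Char)), l.length < fuel →
    (∃ j, sep <+: l.drop j) →
    acc.length + 2 ≤ (PySem.Chars.splitOn.go sep fuel l cur acc).length := by
  intro fuel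
  induction fuel with
  | zero => intro l cur acc hlt; omega
  | succ f ih =>
    intro l cur acc hlt hj
    obtain ⟨j, hj⟩ := hj
    cases l with
    | nil =>
      rw [List.drop_nil] at hj
      exact absurd (List.prefix_nil.mp hj) hsep
    | cons c rest =>
      rw [PySem.Chars.splitOn.go]
      split
      · calc acc.length + 2 = (List.reverse cur :: acc).length + 1 := by simp
             _ ≤ _ := pvGoLenGe sep f _ _ _
      · rename_i hnp
        cases j with
        | zero =>
          exact absurd (List.isPrefixOf_iff_prefix.mpr (by simpa using hj)) (by simpa using hnp)
        | succ j' =>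
          exact ih rest (c :: cur) acc (by simpa using Nat.lt_of_succ_lt_succ hlt)
            ⟨j', by simpa using hj⟩

-- sep ∈ el (sep ≠ "") gives at least two pieces
theorem pvSplitLen2 (el sep : List Char) (hsep : sep ≠ [])
    (h : PySem.Chars.isIn sep el = true) :
    2 ≤ (PySem.Chars.splitOn el sep).length := by
  obtain ⟨j, hj⟩ := (PySem.Chars.exists_prefix_drop_iff_isIn sep el).mpr h
  simpa using pvGoLenGe2 sep hsep (el.length + 1) el [] [] (by omega) ⟨j, hj⟩

-- B's fold over a concatenation of token lists is the composition of the folds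
theorem pvFoldAppend (st : List (List String) × List String)
    (a b : List (Option String)) :
    splitSublistsFold st (a ++ b) = splitSublistsFold (splitSublistsFold st a) b := by
  simp [splitSublistsFold, List.foldl_append]

-- A's inner loop over the tail pieces equals B's fold over their sentinel-marked tokens
theorem pvInnerTok : ∀ (ps : List String) (p : String)
    (st : List (List String) × List String),
    splitSublistsInner (st.1 ++ [st.2], []) (p :: ps) =
    splitSublistsFold st ((p :: ps).flatMap
      (fun q => none :: (if q = "" then [] else [some q]))) := by
  intro ps
  induction ps with
  | nil =>
    intro p st
    by_cases hp : p = "" <;>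
      simp [splitSublistsInner, splitSublistsFold, hp]
  | cons r rest ih =>
    intro p st
    rw [show ((p :: r :: rest).flatMap
          fun q => none :: (if q = "" then [] else [some q])) =
        (none :: (if p = "" then [] else [some p])) ++
          ((r :: rest).flatMap fun q => none :: (if q = "" then [] else [some q])) from
      List.flatMap_cons ..]
    rw [pvFoldAppend, ← ih r]
    by_cases hp : p = "" <;>
      simp [splitSublistsInner, splitSublistsFold, hp]

-- per-element: A's step equals B's fold over that element's tokens
theorem pvStepTok (sep : String) (hsep : sep ≠ "") (el : String)
    (st : List (List String) × List String) :
    splitSublistsStep sep st el = splitSublistsFold st (splitSublistsTok sep el) := by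
  unfold splitSublistsStep splitSublistsTok
  cases hin : PySem.Str.isIn sep el with
  | false => simp [splitSublistsFold]
  | true =>
    rw [if_neg (by simp), if_neg (by simp)]
    have hsepL : sep.toList ≠ [] := by simp [hsep]
    have hin' : PySem.Chars.isIn sep.toList el.toList = true := by
      rw [← PySem.Str.isIn_eq]; exact hin
    have hlen2 : 2 ≤ ((PySem.Str.split? el sep).getD []).length := by
      simp [PySem.Str.split?, PySem.Chars.split?, hsepL]
      exact pvSplitLen2 el.toList sep.toList hsepL hin'
    rcases hpl : (PySem.Str.split? el sep).getD [] with _ | ⟨p0, _ | ⟨p1, rest⟩⟩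
    · rw [hpl] at hlen2; simp at hlen2
    · rw [hpl] at hlen2; simp at hlen2
    · simp only [List.headD_cons, List.tail_cons]
      rw [pvFoldAppend, ← pvInnerTok rest p1]
      by_cases hp0 : p0 = "" <;> simp [splitSublistsFold, hp0]

theorem splitSublists_spec_aux (sep : String) (hsep : sep ≠ "") :
    ∀ (llist : List String) (st : List (List String) × List String),
    llist.foldl (splitSublistsStep sep) st =
      splitSublistsFold st (llist.flatMap (splitSublistsTok sep)) := by
  intro llist
  induction llist with
  | nil => intro st; simp [splitSublistsFold]
  | cons el rest ih =>
    intro st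
    simp only [List.foldl_cons, List.flatMap_cons]
    rw [pvFoldAppend, ← pvStepTok sep hsep el st]
    exact ih _

-- ===== VERDICT (by name: the statement is the Claim_ definition above) =====
theorem splitSublists_spec : Claim_equal_splitSublists := by
  intro llist sep _ hpre
  unfold Spec_splitSublists splitSublists splitSublists_alt
  rcases hpre with hsep | hnil
  · rw [PySem.List.foldl_append_eq_flatMap]
    rw [splitSublists_spec_aux sep hsep llist ([], [])]
    rfl
  · subst hnil; rfl
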